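-- pv_equiv track=rewrite | github.com/K4chur/python-chnu | lab3/lab3_3.py | count_previous_occurrences
-- ===== SOURCE A (Python) =====
-- def count_previous_occurrences(text):
--     words = text.split()
--     word_count = {}
--     result = []
--
--     for word in words:
--         if word not in word_count:
--             word_count[word] = 0
--
--         result.append(word_count[word])
--         word_count[word] += 1
--
--     return result
-- ===== SOURCE B (Python) =====
-- def count_previous_occurrences(text):
--     words = text.split()
--     return [words[:i].count(w) for i, w in enumerate(words)]
-- ===== Notes on version B (the rewrite author's own statement) =====
-- stated objective: simpler
-- what changed: Replaces the stateful running-count dictionary loop with a stateless comprehension that recounts each word in the prefix words[:i].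
import Mathlib
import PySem

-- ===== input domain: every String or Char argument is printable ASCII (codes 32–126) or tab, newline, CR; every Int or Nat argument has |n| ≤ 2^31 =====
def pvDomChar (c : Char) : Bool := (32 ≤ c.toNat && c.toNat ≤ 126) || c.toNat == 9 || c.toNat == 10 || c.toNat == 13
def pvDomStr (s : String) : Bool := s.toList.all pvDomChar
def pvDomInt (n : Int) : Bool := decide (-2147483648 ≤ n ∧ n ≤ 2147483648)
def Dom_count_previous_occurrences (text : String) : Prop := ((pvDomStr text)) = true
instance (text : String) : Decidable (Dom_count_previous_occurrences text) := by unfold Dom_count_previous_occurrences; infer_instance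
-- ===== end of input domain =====

-- B replaces A's running-count dictionary with a stateless prefix recount (simpler; not faster).


-- ===== PORT A =====
-- loop body of A: ensure the key, append its current count, bump it
def stepA (acc : List Int × PySem.Dict String Int) (word : String) :
    List Int × PySem.Dict String Int :=
  let wc := if acc.2.contains word then acc.2 else acc.2.insert word 0
  (acc.1 ++ [wc.getD word 0], wc.insert word (wc.getD word 0 + 1))

def count_previous_occurrences (text : String) : List Int :=
  ((PySem.Str.split₀ text).foldl stepA ([], PySem.Dict.empty)).1

-- ===== PORT B =====
def count_previous_occurrences_alt (text : String) : List Int :=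
  let words := PySem.Str.split₀ text
  (PySem.List.enumerate words 0).map (fun p =>
    ((PySem.List.slice words none (some p.1)).count p.2 : Int))

-- ===== PRECONDITION & SPEC =====
def Spec_count_previous_occurrences (text : String) (out : List Int) : Prop := out = count_previous_occurrences_alt text
instance (text : String) (out : List Int) : Decidable (Spec_count_previous_occurrences text out) := by unfold Spec_count_previous_occurrences; infer_instance

-- ===== CLAIM (what is proved, stated in full; the proofs are below) =====
def Claim_equal_count_previous_occurrences : Prop := ∀ (text : String), Dom_count_previous_occurrences text → Spec_count_previous_occurrences text (count_previous_occurrences text)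

-- ===== LEMMAS AND PROOFS =====

-- the common characterisation: previous-occurrence counts of ws after a prefix pre
def auxCnt : List String → List String → List Int
  | _, [] => []
  | pre, w :: ws => ((pre.count w : Nat) : Int) :: auxCnt (pre ++ [w]) ws

lemma loopA_eq (ws : List String) : ∀ (pre : List String) (res : List Int)
    (d : PySem.Dict String Int), (∀ w, d.getD w 0 = ((pre.count w : Nat) : Int)) →
    (ws.foldl stepA (res, d)).1 = res ++ auxCnt pre ws := by
  induction ws with
  | nil => intro pre res d _; simp [auxCnt]
  | cons w ws ih =>
    intro pre res d hd
    have hwc : (if (PySem.Dict.contains d w) then d else d.insert w 0).getD w 0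
        = ((pre.count w : Nat) : Int) := by
      by_cases h : PySem.Dict.contains d w = true
      · simp [h, hd w]
      · have h0 : d.getD w 0 = 0 := by
          rw [PySem.Dict.getD_eq_get?_getD]
          rw [(PySem.Dict.get?_eq_none_iff_contains _ _).2 (by simpa using h)]
          rfl
        have := hd w
        rw [h0] at this
        simp [h, PySem.Dict.getD_insert_self, ← this]
    have hd' : ∀ v, ((if (PySem.Dict.contains d w) then d else d.insert w 0).insert w
        ((if (PySem.Dict.contains d w) then d else d.insert w 0).getD w 0 + 1)).getD v 0
        = (((pre ++ [w]).count v : Nat) : Int) := by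
      intro v
      rw [PySem.Dict.getD_insert]
      by_cases hv : v = w
      · subst hv
        simp [hwc, List.count_append]
      · have : (if (PySem.Dict.contains d w) then d else d.insert w 0).getD v 0
            = d.getD v 0 := by
          by_cases h : PySem.Dict.contains d w = true
          · simp [h]
          · simp [h, PySem.Dict.getD_insert, hv]
        simp [hv, this, hd v, List.count_append, Ne.symm hv]
    simp only [List.foldl_cons, auxCnt]
    rw [show stepA (res, d) w = (res ++ [(if (PySem.Dict.contains d w) then d
        else d.insert w 0).getD w 0], (if (PySem.Dict.contains d w) then d
        else d.insert w 0).insert w ((if (PySem.Dict.contains d w) then d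
        else d.insert w 0).getD w 0 + 1)) from rfl]
    rw [ih (pre ++ [w]) _ _ hd', hwc]
    simp

lemma mapEnum_eq (ws : List String) : ∀ (pre : List String),
    (PySem.List.enumerate ws ((pre.length : Nat) : Int)).map (fun p =>
      (((pre ++ ws).take p.1.toNat).count p.2 : Int)) = auxCnt pre ws := by
  induction ws with
  | nil => intro pre; simp [PySem.List.enumerate_nil, auxCnt]
  | cons w ws ih =>
    intro pre
    rw [PySem.List.enumerate_cons]
    simp only [List.map_cons, auxCnt]
    have hhead : (pre ++ w :: ws).take ((pre.length : Int)).toNat = pre := by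
      simp
    rw [hhead]
    congr 1
    have hlen : ((pre.length : Int)) + 1 = (((pre ++ [w]).length : Nat) : Int) := by
      simp
    have happ : pre ++ w :: ws = (pre ++ [w]) ++ ws := by simp
    rw [hlen, happ]
    exact ih (pre ++ [w])

lemma alt_eq_aux (text : String) :
    count_previous_occurrences_alt text = auxCnt [] (PySem.Str.split₀ text) := by
  unfold count_previous_occurrences_alt
  have h1 : ∀ p ∈ PySem.List.enumerate (PySem.Str.split₀ text) 0,
      ((PySem.List.slice (PySem.Str.split₀ text) none (some p.1)).count p.2 : Int)
      = ((([] ++ PySem.Str.split₀ text).take p.1.toNat).count p.2 : Int) := by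
    intro p hp
    rcases (PySem.List.mem_enumerate_iff _ _ _).1 hp with ⟨k, hk, rfl⟩
    simp [PySem.List.slice_to_natCast]
  rw [List.map_congr_left h1]
  have h0 : (0 : Int) = ((([] : List String).length : Nat) : Int) := by simp
  rw [h0, mapEnum_eq]

-- ===== VERDICT (by name: the statement is the Claim_ definition above) =====
theorem count_previous_occurrences_spec : Claim_equal_count_previous_occurrences := by
  intro text _
  show count_previous_occurrences text = count_previous_occurrences_alt text
  rw [alt_eq_aux]
  unfold count_previous_occurrences
  rw [loopA_eq _ [] [] PySem.Dict.empty (by intro w; simp [PySem.Dict.getD_empty])]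
  simp
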